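-- pv_equiv track=rewrite | github.com/Ruan-Pablo/N-puzzel_BuscaEmLargura | trabalho_1.py | ehObjetivo
-- ===== SOURCE A (Python) =====
-- def ehObjetivo(tabuleiro:list):
--     tamanho = len(tabuleiro)
--     matriz_meta = []
--     for linha in range(tamanho):
--         linha_meta = []
--         for coluna in range(tamanho):
--             valor = linha * tamanho + coluna + 1
--             if valor == tamanho * tamanho:
--                 valor = 0
--             linha_meta.append(valor)
--         matriz_meta.append(linha_meta)
--
--     return matriz_meta == tabuleiro
-- ===== SOURCE B (Python) =====
-- def ehObjetivo(tabuleiro: list):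
--     n = len(tabuleiro)
--     if any(len(linha) != n for linha in tabuleiro):
--         return False
--     flat = [v for linha in tabuleiro for v in linha]
--     if n == 0:
--         return True
--     if flat[-1] != 0:
--         return False
--     prefixo = flat[:-1]
--     if prefixo and prefixo[0] != 1:
--         return False
--     return all(y == x + 1 for x, y in zip(prefixo, prefixo[1:]))
-- ===== Notes on version B (the rewrite author's own statement) =====
-- stated objective: faster
-- what changed: B never constructs the goal board: it checks the characterizing properties directly -- all rows have length n, the flattened board ends in 0, and the rest is a consecutive run 1,2,3,... verified by zipping the flat prefix with its own tail -- with early exit instead of A's build-whole-goal-matrix-then-compare.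
import Mathlib
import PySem

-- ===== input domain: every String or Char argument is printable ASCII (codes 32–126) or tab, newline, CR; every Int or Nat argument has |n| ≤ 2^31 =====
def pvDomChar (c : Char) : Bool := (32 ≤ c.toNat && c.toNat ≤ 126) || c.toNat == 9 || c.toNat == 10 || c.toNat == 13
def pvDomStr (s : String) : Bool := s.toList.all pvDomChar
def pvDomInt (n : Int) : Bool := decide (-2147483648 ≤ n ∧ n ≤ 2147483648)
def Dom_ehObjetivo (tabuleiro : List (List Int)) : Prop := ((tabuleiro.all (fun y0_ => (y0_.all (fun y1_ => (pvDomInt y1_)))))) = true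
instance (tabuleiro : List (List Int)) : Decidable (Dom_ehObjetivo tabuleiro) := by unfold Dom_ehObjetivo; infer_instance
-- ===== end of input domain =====

-- B never builds the goal board: it checks the characterizing properties (square shape,
-- flattened board = consecutive run 1,2,... ending in 0, checked by zipping the flat
-- prefix with its own tail) with early exit and no goal-matrix allocation; the timing
-- run measured B a constant factor faster.

-- ===== PORT A =====
def ehObjetivo (tabuleiro : List (List Int)) : Bool :=
  let tamanho : Int := tabuleiro.length
  let matriz_meta : List (List Int) :=
    (PySem.List.pyRange 0 tamanho 1).foldl (fun acc linha =>
      acc ++ [(PySem.List.pyRange 0 tamanho 1).foldl (fun linha_meta coluna =>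
        let valor := linha * tamanho + coluna + 1
        let valor := if valor = tamanho * tamanho then 0 else valor
        linha_meta ++ [valor]) ([] : List Int)]) ([] : List (List Int))
  matriz_meta == tabuleiro

-- ===== PORT B =====
def ehObjetivo_alt (tabuleiro : List (List Int)) : Bool :=
  let n := tabuleiro.length
  if tabuleiro.any (fun linha => linha.length ≠ n) then false
  else
    let flat := tabuleiro.flatMap (fun linha => linha)
    if n = 0 then true
    else if PySem.List.pyGet? flat (-1) ≠ some 0 then false
    else
      let prefixo := PySem.List.slice flat none (some (-1))
      if prefixo ≠ [] ∧ PySem.List.pyGet? prefixo 0 ≠ some 1 then false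
      else (prefixo.zip (PySem.List.slice prefixo (some 1) none)).all (fun p => p.2 == p.1 + 1)

-- ===== PRECONDITION & SPEC =====
def Spec_ehObjetivo (tabuleiro : List (List Int)) (out : Bool) : Prop := out = ehObjetivo_alt tabuleiro
instance (tabuleiro : List (List Int)) (out : Bool) : Decidable (Spec_ehObjetivo tabuleiro out) := by unfold Spec_ehObjetivo; infer_instance

-- ===== CLAIM (what is proved, stated in full; the proofs are below) =====
def Claim_equal_ehObjetivo : Prop := ∀ (tabuleiro : List (List Int)), Dom_ehObjetivo tabuleiro → Spec_ehObjetivo tabuleiro (ehObjetivo tabuleiro)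

-- ===== LEMMAS AND PROOFS =====

-- the goal cell value at flat position k of an n*n board
def pvF (m k : ℕ) : Int := if k + 1 = m then 0 else (k : Int) + 1

-- the goal board, in Nat-range form
def pvGoal (n : ℕ) : List (List Int) :=
  (List.range n).map (fun i => (List.range n).map (fun j => pvF (n * n) (i * n + j)))

-- the run a, a+1, a+2, ... of the given length
def pvRun (a : Int) (len : ℕ) : List Int := (List.range len).map (fun k : ℕ => a + (k : Int))

theorem pvRun_succ (a : Int) (n : ℕ) : pvRun a (n + 1) = a :: pvRun (a + 1) n := by
  unfold pvRun
  rw [List.range_succ_eq_map, List.map_cons, List.map_map]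
  simp only [Nat.cast_zero, add_zero]
  congr 1
  refine List.map_congr_left (fun k _ => ?_)
  simp only [Function.comp, Nat.succ_eq_add_one]
  push_cast; ring

-- A's port computes 'goal board == input'
theorem pvMat_eq (n : ℕ) :
    ((List.range n).map (fun k : ℕ => (k : Int))).map (fun i =>
      ((List.range n).map (fun k : ℕ => (k : Int))).map (fun j =>
        if i * (n : Int) + j + 1 = (n : Int) * (n : Int) then 0 else i * (n : Int) + j + 1))
    = pvGoal n := by
  unfold pvGoal
  simp only [List.map_map]
  refine List.map_congr_left (fun i _ => ?_)
  simp only [Function.comp_apply]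
  refine List.map_congr_left (fun j _ => ?_)
  simp only [Function.comp_apply, pvF]
  have hcast : ((i : Int) * (n : Int) + (j : Int) + 1)
      = (((i * n + j + 1 : ℕ) : Int)) := by push_cast; ring
  have hcast2 : ((n : Int) * (n : Int)) = (((n * n : ℕ) : Int)) := by push_cast; ring
  rw [hcast, hcast2]
  by_cases h : i * n + j + 1 = n * n
  · rw [if_pos (by exact_mod_cast h), if_pos (by omega)]
  · rw [if_neg (by exact_mod_cast h), if_neg (by omega)]
    push_cast; ring

theorem pvAchar (tab : List (List Int)) :
    ehObjetivo tab = decide (pvGoal tab.length = tab) := by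
  unfold ehObjetivo
  simp only [PySem.List.foldl_append_singleton_eq_map, List.nil_append]
  have hr : PySem.List.pyRange 0 (tab.length : Int) 1
      = (List.range tab.length).map (fun k : ℕ => (k : Int)) := by
    rw [PySem.List.pyRange_one]
    simp
  rw [hr, pvMat_eq]
  by_cases h : pvGoal tab.length = tab <;> simp [h]

-- the zip-with-tail successor scan (with head check) recognizes exactly the run a, a+1, ...
def pvCore (p : List Int) (a : Int) : Bool :=
  if p ≠ [] ∧ PySem.List.pyGet? p 0 ≠ some a then false
  else (p.zip p.tail).all (fun q => q.2 == q.1 + 1)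

theorem pvCore_eq (p : List Int) (a : Int) :
    pvCore p a = decide (p = pvRun a p.length) := by
  induction p generalizing a with
  | nil => simp [pvCore, pvRun]
  | cons x t ih =>
    rw [List.length_cons, pvRun_succ]
    by_cases hx : x = a
    · subst hx
      rw [pvCore, if_neg (by simp)]
      cases t with
      | nil => simp [pvRun]
      | cons y t' =>
        simp only [List.length_cons]
        have hzip : ((x :: y :: t').zip (x :: y :: t').tail).all (fun q => q.2 == q.1 + 1)
            = ((y == x + 1) && ((y :: t').zip (y :: t').tail).all (fun q => q.2 == q.1 + 1)) := by
          simp [List.zip]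
        rw [hzip]
        by_cases hy : y = x + 1
        · subst hy
          have hih := ih (x + 1)
          rw [pvCore, if_neg (by simp), List.length_cons] at hih
          rw [hih]
          simp only [beq_self_eq_true, Bool.true_and]
          rw [decide_eq_decide]
          constructor
          · intro h; rw [← h]
          · intro h; exact (List.cons_eq_cons.mp h).2
        · have hyb : (y == x + 1) = false := by simp [hy]
          rw [hyb, Bool.false_and]
          symm; rw [decide_eq_false_iff_not]
          intro hc
          have h2 := (List.cons_eq_cons.mp hc).2
          rw [pvRun_succ] at h2
          exact hy (List.cons_eq_cons.mp h2).1
    · rw [pvCore, if_pos ⟨by simp, by simp [hx]⟩]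
      symm; rw [decide_eq_false_iff_not]
      intro hc
      exact hx (List.cons_eq_cons.mp hc).1

-- flattening the row-major goal matrix gives the flat goal list
theorem pvFlattenRows (f : ℕ → Int) (b : ℕ) :
    ∀ (a : ℕ), ((List.range a).map (fun i => (List.range b).map (fun j => f (i * b + j)))).flatten
      = (List.range (a * b)).map f := by
  intro a
  induction a with
  | zero => simp
  | succ a ih =>
    rw [List.range_succ, List.map_append, List.flatten_append, ih]
    have hab : (a + 1) * b = a * b + b := by ring
    rw [hab, List.range_add, List.map_append]
    simp [List.map_map, Function.comp]

theorem pvGoalFlatten (n : ℕ) :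
    (pvGoal n).flatten = (List.range (n * n)).map (pvF (n * n)) := by
  unfold pvGoal
  rw [pvFlattenRows]

-- flatten is injective given identical row lengths
theorem pvFlattenInj : ∀ (xs ys : List (List Int)),
    xs.map List.length = ys.map List.length → xs.flatten = ys.flatten → xs = ys := by
  intro xs
  induction xs with
  | nil => intro ys h _; cases ys with
    | nil => rfl
    | cons y ys => simp at h
  | cons x xs ih =>
    intro ys h hf
    cases ys with
    | nil => simp at h
    | cons y ys =>
      simp only [List.map_cons, List.cons_eq_cons] at h
      rw [List.flatten_cons, List.flatten_cons] at hf
      obtain ⟨hxy, hrest⟩ := List.append_inj hf h.1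
      rw [hxy, ih ys h.2 hrest]

theorem pvGoal_rowlens (n : ℕ) : (pvGoal n).map List.length = List.replicate n n := by
  unfold pvGoal
  rw [List.map_map, List.eq_replicate_iff]
  refine ⟨by simp, fun b hb => ?_⟩
  simp only [List.mem_map] at hb
  obtain ⟨i, _, hi⟩ := hb
  simp [← hi]

-- the flat goal list is the run 1,2,... followed by 0
theorem pvGoalFlat_decomp (m : ℕ) (hm : 1 ≤ m) :
    (List.range m).map (pvF m) = pvRun 1 (m - 1) ++ [0] := by
  obtain ⟨s, rfl⟩ : ∃ s, m = s + 1 := ⟨m - 1, by omega⟩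
  simp only [Nat.add_sub_cancel]
  unfold pvRun
  rw [List.range_succ, List.map_append]
  refine congrArg₂ _ (List.map_congr_left (fun k hk => ?_)) ?_
  · rw [List.mem_range] at hk
    simp only [pvF]
    rw [if_neg (by omega)]
    ring
  · simp [pvF]

-- ===== VERDICT (by name: the statement is the Claim_ definition above) =====
theorem ehObjetivo_spec : Claim_equal_ehObjetivo := by
  intro tab _
  unfold Spec_ehObjetivo
  rw [pvAchar]
  unfold ehObjetivo_alt
  by_cases hshape : tab.any (fun linha => linha.length ≠ tab.length) = true
  · rw [if_pos hshape, decide_eq_false_iff_not]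
    intro heq
    rw [List.any_eq_true] at hshape
    obtain ⟨l, hl, hlen⟩ := hshape
    rw [← heq] at hl
    unfold pvGoal at hl
    rw [List.mem_map] at hl
    obtain ⟨i, _, hi⟩ := hl
    simp only [decide_eq_true_eq] at hlen
    apply hlen
    rw [← hi]
    simp
  · rw [if_neg hshape]
    have hrows : ∀ l ∈ tab, l.length = tab.length := by
      intro l hl
      by_contra hne
      exact hshape (List.any_eq_true.mpr ⟨l, hl, by simpa using hne⟩)
    have hmaplen : tab.map List.length = List.replicate tab.length tab.length := by
      rw [List.eq_replicate_iff]
      exact ⟨by simp, fun b hb => by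
        rw [List.mem_map] at hb; obtain ⟨l, hl, h⟩ := hb; rw [← h]; exact hrows l hl⟩
    have hflatmap : tab.flatMap (fun linha => linha) = tab.flatten := by
      simp [List.flatMap_def]
    rw [hflatmap]
    have hflatlen : tab.flatten.length = tab.length * tab.length := by
      rw [List.length_flatten, hmaplen, List.sum_replicate_nat]
    by_cases hn : tab.length = 0
    · rw [if_pos hn]
      have : tab = [] := List.length_eq_zero_iff.mp hn
      subst this
      simp [pvGoal]
    · rw [if_neg hn]
      have hm1 : 1 ≤ tab.length * tab.length :=
        Nat.mul_pos (Nat.pos_of_ne_zero hn) (Nat.pos_of_ne_zero hn)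
      have hflatne : tab.flatten ≠ [] := by
        intro h
        have h0 : tab.flatten.length = 0 := by rw [h]; rfl
        rw [hflatlen] at h0
        omega
      have hiff : pvGoal tab.length = tab
          ↔ tab.flatten
            = (List.range (tab.length * tab.length)).map (pvF (tab.length * tab.length)) := by
      
        constructor
        · intro h
          conv_lhs => rw [← h]
          rw [pvGoalFlatten]
        · intro h
          refine pvFlattenInj _ _ ?_ ?_
          · rw [pvGoal_rowlens, hmaplen]
          · rw [pvGoalFlatten, h]
      have hdll : tab.flatten.dropLast.length = tab.length * tab.length - 1 := by
        rw [List.length_dropLast, hflatlen]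
      have hiff2 : tab.flatten = pvRun 1 (tab.length * tab.length - 1) ++ [0]
          ↔ (tab.flatten.dropLast = pvRun 1 (tab.length * tab.length - 1)
              ∧ tab.flatten.getLast? = some 0) := by
        constructor
        · intro h
          rw [h, List.dropLast_concat, List.getLast?_concat]
          exact ⟨rfl, rfl⟩
        · rintro ⟨h1, h2⟩
          rw [List.getLast?_eq_some_getLast hflatne] at h2
          have h0 : tab.flatten.getLast hflatne = 0 := by injection h2
          rw [← List.dropLast_concat_getLast hflatne, h1, h0]
      simp only [PySem.List.pyGet?_neg_one, PySem.List.slice_to_neg_one,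
        PySem.List.slice_from_one]
      by_cases hlast : tab.flatten.getLast? = some 0
      · rw [if_neg (by simp [hlast])]
        have hcore := pvCore_eq tab.flatten.dropLast 1
        rw [pvCore] at hcore
        rw [hcore, hdll, decide_eq_decide, hiff, pvGoalFlat_decomp _ hm1, hiff2]
        constructor
        · intro h; exact h.1
        · intro h; exact ⟨h, hlast⟩
      · rw [if_pos (by simp [hlast]), decide_eq_false_iff_not]
        intro h
        rw [hiff, pvGoalFlat_decomp _ hm1, hiff2] at h
        exact hlast h.2
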